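-- pv_equiv track=rewrite | github.com/Romeo749S/CS50P | problem_set 3/grocery/grocery.py | items_sort
-- ===== SOURCE A (Python) =====
-- def items_sort(list1):
--     list1.sort() # sorts all griceries in alpha order
--
--     list2 = []
--     for n in list1 :
--         list2.append(list1.count(n))#putting the quant. in
--         a = list1.count(n) - 1
--         while  a > 0:	#loop for removing duplicates
--             list1.remove(list1[list1.index(n)+a])
--
--             a -= 1
--
--     return list2, list1
-- ===== SOURCE B (Python) =====
-- def items_sort(list1):
--     freq = {}
--     for item in list1:
--         freq[item] = freq.get(item, 0) + 1
--     uniques = sorted(freq)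
--     list1[:] = uniques
--     return [freq[k] for k in uniques], list1
-- ===== Notes on version B (the rewrite author's own statement) =====
-- stated objective: faster
-- what changed: Replaces sort-then-quadratic-count-and-remove (list.count and list.remove inside the loop) by a single-pass dict frequency tally followed by sorting only the distinct keys.
import Mathlib
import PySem

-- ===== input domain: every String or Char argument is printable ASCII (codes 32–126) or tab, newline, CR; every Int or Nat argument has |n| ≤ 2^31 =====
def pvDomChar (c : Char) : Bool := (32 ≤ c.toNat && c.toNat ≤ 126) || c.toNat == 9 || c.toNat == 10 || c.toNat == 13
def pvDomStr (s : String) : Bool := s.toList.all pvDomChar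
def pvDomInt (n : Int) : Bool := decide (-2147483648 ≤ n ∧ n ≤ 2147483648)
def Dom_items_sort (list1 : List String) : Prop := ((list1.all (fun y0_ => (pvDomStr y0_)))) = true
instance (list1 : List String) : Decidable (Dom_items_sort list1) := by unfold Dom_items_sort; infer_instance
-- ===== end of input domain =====

-- B replaces A's sort-then-quadratic count/remove loop by a one-pass frequency dict plus a sort of
-- the distinct keys (objective: faster). Both versions mutate the argument list in place in Python
-- (A sorts and removes, B reassigns list1[:]); the equivalence proved here is about the RETURN value
-- (both leave the argument equal to the returned deduplicated sorted list).

-- ===== PORT A =====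
-- helper needed by the port's termination proof: the inner while loop never lengthens the list
theorem itemsInner_step_length_le (l : List String) (v : String) :
    ((PySem.List.remove? l v).getD l).length ≤ l.length := by
  by_cases h : v ∈ l
  · rw [PySem.List.remove?_eq_some_erase l v h]
    simpa using (List.length_erase_le : (l.erase v).length ≤ l.length)
  · rw [(PySem.List.remove?_eq_none_iff l v).mpr h]
    simp

-- inner while loop:  `while a > 0: list1.remove(list1[list1.index(n)+a]); a -= 1`
-- (list1.index(n) and the indexing never fail in A's executions; the `getD` fallbacks are unreachable there)
def itemsInner (l : List String) (n : String) : Nat → List String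
  | 0 => l
  | a + 1 =>
    let l' :=
      match PySem.List.pyGet? l ((((PySem.List.index? l n).getD 0 : Nat) : Int) + ((a : Int) + 1)) with
      | some v => (PySem.List.remove? l v).getD l
      | none => l
    itemsInner l' n a

theorem itemsInner_length_le (l : List String) (n : String) (a : Nat) :
    (itemsInner l n a).length ≤ l.length := by
  induction a generalizing l with
  | zero => simp [itemsInner]
  | succ a ih =>
    simp only [itemsInner]
    split
    · exact le_trans (ih _) (itemsInner_step_length_le _ _)
    · exact ih l

-- outer loop: Python's `for n in list1` over the mutating list = index cursor i into the current list
def itemsOuter (l : List String) (i : Nat) (acc : List Int) : List Int × List String :=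
  if h : i < l.length then
    let n := l[i]
    let c : Int := (PySem.List.count l n : Nat)
    let l' := itemsInner l n (c - 1).toNat
    itemsOuter l' (i + 1) (acc ++ [c])
  else (acc, l)
termination_by l.length - i
decreasing_by
  have hle := itemsInner_length_le l l[i] ((((PySem.List.count l l[i] : Nat) : Int) - 1).toNat)
  omega

def items_sort (list1 : List String) : List Int × List String :=
  itemsOuter (PySem.List.sorted list1 (fun x => x) false) 0 []

-- ===== PORT B =====
def items_sort_alt (list1 : List String) : List Int × List String :=
  let freq : PySem.Dict String Int :=
    list1.foldl (fun d x => d.insert x (d.getD x 0 + 1)) PySem.Dict.empty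
  let uniques := PySem.List.sorted freq.keys (fun x => x) false
  (uniques.map (fun k => freq.getD k 0), uniques)

-- ===== PRECONDITION & SPEC =====
def Spec_items_sort (list1 : List String) (out : List Int × List String) : Prop := out = items_sort_alt list1
instance (list1 : List String) (out : List Int × List String) : Decidable (Spec_items_sort list1 out) := by unfold Spec_items_sort; infer_instance

-- ===== CLAIM (what is proved, stated in full; the proofs are below) =====
def Claim_equal_items_sort : Prop := ∀ (list1 : List String), Dom_items_sort list1 → Spec_items_sort list1 (items_sort list1)

-- ===== LEMMAS AND PROOFS =====

-- deduplication of a list with equal elements adjacent (proof-side characterisation of A's loop)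
def uniq : List String → List String
  | [] => []
  | x :: xs => x :: uniq (xs.dropWhile (fun y => y == x))
termination_by l => l.length
decreasing_by
  have := List.length_dropWhile_le (fun y => y == x) xs
  simpa using Nat.lt_succ_of_le this

theorem mem_uniq_aux (x : String) : ∀ (N : Nat) (l : List String), l.length ≤ N →
    (x ∈ uniq l ↔ x ∈ l) := by
  intro N
  induction N with
  | zero =>
    intro l h
    have : l = [] := List.eq_nil_of_length_eq_zero (Nat.le_zero.mp h)
    subst this; simp [uniq]
  | succ N ih =>
    intro l h
    match l with
    | [] => simp [uniq]
    | y :: ys =>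
      rw [uniq]
      have hd := List.length_dropWhile_le (fun z => z == y) ys
      have hlen : (ys.dropWhile (fun z => z == y)).length ≤ N := by
        simp at h; omega
      have hrec := ih (ys.dropWhile (fun z => z == y)) hlen
      constructor
      · intro hx
        rcases List.mem_cons.mp hx with h1 | h2
        · simp [h1]
        · exact List.mem_cons_of_mem _ ((List.dropWhile_sublist _).mem (hrec.mp h2))
      · intro hx
        rcases List.mem_cons.mp hx with h1 | h2
        · exact h1 ▸ List.mem_cons_self
        · have h2' : x ∈ ys.takeWhile (fun z => z == y) ++ ys.dropWhile (fun z => z == y) := by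
            rw [List.takeWhile_append_dropWhile]; exact h2
          rcases List.mem_append.mp h2' with h3 | h3
          · have : x = y := by simpa using List.mem_takeWhile_imp h3
            simp [this]
          · exact List.mem_cons_of_mem _ (hrec.mpr h3)

theorem mem_uniq (x : String) (l : List String) : x ∈ uniq l ↔ x ∈ l :=
  mem_uniq_aux x l.length l le_rfl

theorem lt_of_mem_dropWhile {x y : String} : ∀ {xs : List String},
    (x :: xs).Pairwise (· ≤ ·) → y ∈ xs.dropWhile (fun z => z == x) → x < y := by
  intro xs
  induction xs with
  | nil => simp
  | cons w ws ih =>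
    intro h hy
    obtain ⟨hhead, htail⟩ := List.pairwise_cons.mp h
    by_cases hw : w = x
    · rw [List.dropWhile_cons_of_pos (by simp [hw])] at hy
      refine ih ?_ hy
      exact List.pairwise_cons.mpr ⟨fun z hz => hhead z (List.mem_cons_of_mem _ hz),
        (List.pairwise_cons.mp htail).2⟩
    · rw [List.dropWhile_cons_of_neg (by simp [hw])] at hy
      have hxw : x < w := lt_of_le_of_ne (hhead w List.mem_cons_self) (Ne.symm hw)
      rcases List.mem_cons.mp hy with h1 | h1
      · exact h1 ▸ hxw
      · exact lt_of_lt_of_le hxw ((List.pairwise_cons.mp htail).1 y h1)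

theorem uniq_pairwise_lt_aux : ∀ (N : Nat) (l : List String), l.length ≤ N →
    l.Pairwise (· ≤ ·) → (uniq l).Pairwise (· < ·) := by
  intro N
  induction N with
  | zero =>
    intro l h _
    have : l = [] := List.eq_nil_of_length_eq_zero (Nat.le_zero.mp h)
    subst this; simp [uniq]
  | succ N ih =>
    intro l h hs
    match l with
    | [] => simp [uniq]
    | x :: xs =>
      rw [uniq]
      have hd := List.length_dropWhile_le (fun z => z == x) xs
      have hlen : (xs.dropWhile (fun z => z == x)).length ≤ N := by simp at h; omega
      have htail : (xs.dropWhile (fun z => z == x)).Pairwise (· ≤ ·) :=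
        ((List.pairwise_cons.mp hs).2).sublist (List.dropWhile_sublist _)
      refine List.pairwise_cons.mpr ⟨?_, ih _ hlen htail⟩
      intro y hy
      exact lt_of_mem_dropWhile hs ((mem_uniq y _).mp hy)

-- a sorted list is its head-block of equal elements followed by the strict remainder
theorem sorted_block (n : String) : ∀ (t : List String), (n :: t).Pairwise (· ≤ ·) →
    n :: t = List.replicate ((n :: t).count n) n ++ t.dropWhile (fun z => z == n) := by
  intro t
  induction t with
  | nil => intro _; simp
  | cons w ws ih =>
    intro h
    by_cases hw : w = n
    · subst hw
      have h' : (w :: ws).Pairwise (· ≤ ·) := (List.pairwise_cons.mp h).2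
      have hrec := ih h'
      rw [List.dropWhile_cons_of_pos (by simp)]
      have hc : (w :: w :: ws).count w = (w :: ws).count w + 1 := by
        simp
      rw [hc, List.replicate_succ]
      simpa [List.cons_append] using congrArg (List.cons w) hrec
    · obtain ⟨hhead, htail⟩ := List.pairwise_cons.mp h
      have hnw : n < w := lt_of_le_of_ne (hhead w List.mem_cons_self) (Ne.symm hw)
      have hnot : n ∉ w :: ws := by
        intro hmem
        rcases List.mem_cons.mp hmem with h1 | h1
        · exact hw (h1.symm)
        · exact absurd (lt_of_lt_of_le hnw ((List.pairwise_cons.mp htail).1 n h1))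
            (lt_irrefl n)
      have hc : (n :: w :: ws).count n = 1 := by
        rw [List.count_cons_self, List.count_eq_zero.mpr hnot]
      rw [List.dropWhile_cons_of_neg (by simp [hw]), hc]
      simp

theorem inner_eq (n : String) (p rest : List String) (hp : n ∉ p) (_hr : n ∉ rest) :
    ∀ (a c : Nat), a < c →
    itemsInner (p ++ List.replicate c n ++ rest) n a = p ++ List.replicate (c - a) n ++ rest := by
  intro a
  induction a with
  | zero => intro c _; simp [itemsInner]
  | succ a ih =>
    intro c hac
    obtain ⟨cc, rfl⟩ : ∃ cc, c = cc + 1 := ⟨c - 1, by omega⟩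
    have hshape : p ++ List.replicate (cc + 1) n ++ rest
        = p ++ n :: (List.replicate cc n ++ rest) := by
      simp [List.replicate_succ]
    have hidx : PySem.List.index? (p ++ List.replicate (cc + 1) n ++ rest) n = some p.length := by
      rw [PySem.List.index?_eq_some_iff]
      exact ⟨p, List.replicate cc n ++ rest, by simpa using hshape, rfl, hp⟩
    have hcast : (((p.length : Nat) : Int) + ((a : Int) + 1)) = ((p.length + (a + 1) : Nat) : Int) := by
      push_cast; ring
    have hget : PySem.List.pyGet? (p ++ List.replicate (cc + 1) n ++ rest)
        ((((PySem.List.index? (p ++ List.replicate (cc + 1) n ++ rest) n).getD 0 : Nat) : Int)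
          + ((a : Int) + 1)) = some n := by
      rw [hidx]
      simp only [Option.getD_some]
      rw [hcast, PySem.List.pyGet?_natCast]
      rw [List.getElem?_append_left (by simp; omega)]
      rw [List.getElem?_append_right (by omega)]
      have h1 : p.length + (a + 1) - p.length = a + 1 := by omega
      rw [h1]
      simp only [List.getElem?_replicate]
      rw [if_pos (by omega)]
    have hmem : n ∈ p ++ List.replicate (cc + 1) n ++ rest := by
      rw [hshape]; simp
    have herase : (p ++ List.replicate (cc + 1) n ++ rest).erase n
        = p ++ List.replicate cc n ++ rest := by
      rw [hshape, List.erase_append_right _ hp, List.erase_cons_head, List.append_assoc]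
    simp only [itemsInner, hget, PySem.List.remove?_eq_some_erase _ n hmem, Option.getD_some,
      herase]
    rw [show cc + 1 - (a + 1) = cc - a from by omega]
    exact ih cc (by omega)

theorem outer_eq (N : Nat) : ∀ (r p : List String) (acc : List Int), r.length ≤ N →
    r.Pairwise (· ≤ ·) → (∀ x ∈ p, ∀ y ∈ r, x < y) →
    itemsOuter (p ++ r) p.length acc =
      (acc ++ (uniq r).map (fun k => ((r.count k : Nat) : Int)), p ++ uniq r) := by
  induction N with
  | zero =>
    intro r p acc hlen _ _
    have : r = [] := List.eq_nil_of_length_eq_zero (Nat.le_zero.mp hlen)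
    subst this
    rw [itemsOuter, dif_neg (by simp)]
    simp [uniq]
  | succ N ih =>
    intro r p acc hlen hsort hlt
    match r with
    | [] =>
      rw [itemsOuter, dif_neg (by simp)]
      simp [uniq]
    | n :: t =>
      have hpos : p.length < (p ++ n :: t).length := by simp
      have hgetn : (p ++ n :: t)[p.length]'hpos = n := by
        rw [List.getElem_append_right (le_refl p.length)]
        simp
      have hnp : n ∉ p := by
        intro hmem
        exact absurd (hlt n hmem n List.mem_cons_self) (lt_irrefl n)
      set c : Nat := (n :: t).count n with hc
      have hcount : PySem.List.count (p ++ n :: t) n = c := by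
        rw [PySem.List.count_eq, List.count_append, List.count_eq_zero.mpr hnp]
        omega
      have hc1 : 1 ≤ c := by
        rw [hc]; simp
      set rest := t.dropWhile (fun z => z == n) with hrest
      have hblock : n :: t = List.replicate c n ++ rest := sorted_block n t hsort
      have hnrest : n ∉ rest := by
        intro hmem
        exact absurd (lt_of_mem_dropWhile hsort hmem) (lt_irrefl n)
      have hinner := inner_eq n p rest hnp hnrest (c - 1) c (by omega)
      rw [itemsOuter, dif_pos hpos]
      simp only [hgetn, hcount]
      have htonat : (((c : Nat) : Int) - 1).toNat = c - 1 := by omega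
      rw [htonat]
      have hstep : itemsInner (p ++ n :: t) n (c - 1) = (p ++ [n]) ++ rest := by
        rw [hblock, ← List.append_assoc, hinner]
        rw [show c - (c - 1) = 1 from by omega]
        simp
      rw [hstep]
      have hlen' : rest.length ≤ N := by
        have hdw := List.length_dropWhile_le (fun z => z == n) t
        rw [← hrest] at hdw
        simp at hlen
        omega
      have hsort' : rest.Pairwise (· ≤ ·) :=
        ((List.pairwise_cons.mp hsort).2).sublist (List.dropWhile_sublist _)
      have hlt' : ∀ x ∈ p ++ [n], ∀ y ∈ rest, x < y := by
        intro x hx y hy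
        rcases List.mem_append.mp hx with h1 | h1
        · exact hlt x h1 y (List.mem_cons_of_mem _ ((List.dropWhile_sublist _).mem hy))
        · have : x = n := by simpa using h1
          exact this ▸ lt_of_mem_dropWhile hsort hy
      have hlength : p.length + 1 = (p ++ [n]).length := by simp
      rw [hlength, ih rest (p ++ [n]) (acc ++ [((c : Nat) : Int)]) hlen' hsort' hlt']
      have huniq : uniq (n :: t) = n :: uniq rest := by rw [uniq]
      have hmapeq : (uniq rest).map (fun k => ((rest.count k : Nat) : Int))
          = (uniq rest).map (fun k => (((n :: t).count k : Nat) : Int)) := by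
        refine List.map_congr_left ?_
        intro k hk
        have hkr : k ∈ rest := (mem_uniq k rest).mp hk
        have hkn : k ≠ n := by
          intro he
          rw [he] at hkr
          exact hnrest hkr
        have : (n :: t).count k = rest.count k := by
          rw [hblock, List.count_append, List.count_replicate]
          simp [Ne.symm hkn]
        rw [this]
      rw [hmapeq, huniq]
      simp [List.append_assoc, ← hc]

-- ===== VERDICT (by name: the statement is the Claim_ definition above) =====
theorem items_sort_spec : Claim_equal_items_sort := by
  intro list1 _
  unfold Spec_items_sort items_sort items_sort_alt
  rw [PySem.Dict.foldl_insert_getD_add_one_eq_counter]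
  simp only [PySem.Dict.keys_counter, PySem.Dict.getD_counter]
  have hsp : (PySem.List.sorted list1 (fun x => x) false).Pairwise (· ≤ ·) := by
    simpa using PySem.List.sorted_pairwise list1 (fun x => x)
  have houter := outer_eq (PySem.List.sorted list1 (fun x => x) false).length
    (PySem.List.sorted list1 (fun x => x) false) [] [] le_rfl hsp (by simp)
  simp only [List.nil_append, List.length_nil] at houter
  rw [houter]
  have hpair := uniq_pairwise_lt_aux (PySem.List.sorted list1 (fun x => x) false).length _
    le_rfl hsp
  have hnodup : (uniq (PySem.List.sorted list1 (fun x => x) false)).Nodup :=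
    hpair.imp ne_of_lt
  have hperm : (uniq (PySem.List.sorted list1 (fun x => x) false)).Perm
      (PySem.Set.ofList list1) := by
    rw [List.perm_ext_iff_of_nodup hnodup (PySem.Set.nodup_ofList list1)]
    intro a
    rw [mem_uniq, PySem.List.mem_sorted, PySem.Set.mem_ofList]
  have hU : PySem.List.sorted (PySem.Set.ofList list1) (fun x => x) false
      = uniq (PySem.List.sorted list1 (fun x => x) false) :=
    PySem.List.sorted_eq_of_perm_of_pairwise_lt _ _ _ hperm hpair
  rw [hU]
  congr 1
  refine List.map_congr_left ?_
  intro k _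
  rw [(PySem.List.sorted_perm list1 (fun x => x) false).count_eq k]
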